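-- pv_equiv track=rewrite | github.com/hamidrezahosseini/SAGA | Saga.py | gap_penalties
-- ===== SOURCE A (Python) =====
-- def gap_penalties(sequence, gap_open=-1, gap_extend=-2):
-- 	gap_length = 0
-- 	num_open = 0
-- 	flag = 0
--
-- 	for i in range(0, len(sequence)):
-- 		# abertura de um gap
-- 		if sequence[i] == '-' and flag == 0:
-- 			flag = 1
-- 		# extencao de gap
-- 		if sequence[i] == '-' and flag == 1:
-- 			num_open += 1
-- 			gap_length += 1
-- 		else:
-- 			flag = 0
--
-- 	gap_length -= num_open
-- 	num_open *= gap_open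
--
-- 	return num_open + gap_length*gap_extend
-- ===== SOURCE B (Python) =====
-- def gap_penalties(sequence, gap_open=-1, gap_extend=-2):
-- 	# A increments num_open and gap_length together on every '-', so they are
-- 	# always equal; gap_length - num_open = 0 and gap_extend never contributes.
-- 	return sequence.count('-') * gap_open
-- ===== Notes on version B (the rewrite author's own statement) =====
-- stated objective: simpler
-- what changed: Replaced the flag/two-accumulator state machine with the closed form count('-') * gap_open, since num_open and gap_length always stay equal so the gap_extend term cancels to zero.
import Mathlib
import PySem

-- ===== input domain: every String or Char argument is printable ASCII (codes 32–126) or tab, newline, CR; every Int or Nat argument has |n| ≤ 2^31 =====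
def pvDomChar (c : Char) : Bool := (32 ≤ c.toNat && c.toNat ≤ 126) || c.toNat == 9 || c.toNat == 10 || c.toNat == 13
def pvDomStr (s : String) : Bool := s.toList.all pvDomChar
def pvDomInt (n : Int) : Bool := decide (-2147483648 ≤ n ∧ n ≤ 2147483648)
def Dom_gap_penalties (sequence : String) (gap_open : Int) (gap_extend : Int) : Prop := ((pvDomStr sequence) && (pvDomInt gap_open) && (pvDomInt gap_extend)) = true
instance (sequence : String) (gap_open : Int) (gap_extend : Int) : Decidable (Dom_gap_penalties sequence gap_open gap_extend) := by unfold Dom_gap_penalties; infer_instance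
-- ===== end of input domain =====

-- B replaces A's flag/two-accumulator state machine with the closed form
-- count('-') * gap_open (num_open and gap_length always stay equal, so the
-- gap_extend term cancels); objective: simpler.


-- ===== PORT A =====
-- the for-loop over the characters of `sequence`, state (gap_length, num_open, flag)
def gapLoopA : List Char → Int × Int × Int → Int × Int × Int
  | [], st => st
  | c :: cs, (gap_length, num_open, flag) =>
      let flag := if c = '-' ∧ flag = 0 then 1 else flag
      if c = '-' ∧ flag = 1 then
        gapLoopA cs (gap_length + 1, num_open + 1, flag)
      else
        gapLoopA cs (gap_length, num_open, 0)

def gap_penalties (sequence : String) (gap_open : Int) (gap_extend : Int) : Int :=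
  let st := gapLoopA sequence.toList (0, 0, 0)
  let gap_length := st.1 - st.2.1
  let num_open := st.2.1 * gap_open
  num_open + gap_length * gap_extend

-- ===== PORT B =====
def gap_penalties_alt (sequence : String) (gap_open : Int) (_gap_extend : Int) : Int :=
  (PySem.Str.count sequence "-" : Int) * gap_open

-- ===== PRECONDITION & SPEC =====
def Spec_gap_penalties (sequence : String) (gap_open : Int) (gap_extend : Int) (out : Int) : Prop := out = gap_penalties_alt sequence gap_open gap_extend
instance (sequence : String) (gap_open : Int) (gap_extend : Int) (out : Int) : Decidable (Spec_gap_penalties sequence gap_open gap_extend out) := by unfold Spec_gap_penalties; infer_instance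

-- ===== CLAIM (what is proved, stated in full; the proofs are below) =====
def Claim_equal_gap_penalties : Prop := ∀ (sequence : String) (gap_open : Int) (gap_extend : Int), Dom_gap_penalties sequence gap_open gap_extend → Spec_gap_penalties sequence gap_open gap_extend (gap_penalties sequence gap_open gap_extend)

-- ===== LEMMAS AND PROOFS =====

-- PySem's non-overlapping substring counter, specialised to a single-char pattern,
-- is plain character counting.
theorem countgo_single : ∀ (fuel : Nat) (l : List Char) (acc : Nat), l.length ≤ fuel →
    PySem.Chars.count.go ['-'] fuel l acc = acc + l.count '-' := by
  intro fuel
  induction fuel with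
  | zero =>
    intro l acc h
    have : l = [] := List.eq_nil_of_length_eq_zero (Nat.le_zero.mp h)
    subst this; rfl
  | succ n ih =>
    intro l acc h
    cases l with
    | nil => rfl
    | cons c t =>
      rw [PySem.Chars.count.go]
      by_cases hc : c = '-'
      · subst hc
        simp [ih t (acc + 1) (by simpa using Nat.lt_succ_iff.mp (by simpa using h))]
        omega
      · have hp : (['-'].isPrefixOf (c :: t)) = false := by
          simp [List.isPrefixOf]; exact fun h' => hc h'.symm
        simp [hp, ih t acc (by simpa using Nat.lt_succ_iff.mp (by simpa using h)), hc]

theorem str_count_dash (s : String) : PySem.Str.count s "-" = s.toList.count '-' := by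
  rw [PySem.Str.count_eq]
  show PySem.Chars.count s.toList ['-'] = _
  simp [PySem.Chars.count]
  rw [countgo_single s.length s.toList 0 (by simp)]
  simp

-- loop invariant: from a state with flag ∈ {0,1}, the loop adds the number of
-- dashes to BOTH gap_length and num_open.
theorem gapLoopA_invariant : ∀ (l : List Char) (gl no f : Int), (f = 0 ∨ f = 1) →
    (gapLoopA l (gl, no, f)).1 = gl + l.count '-' ∧
    (gapLoopA l (gl, no, f)).2.1 = no + l.count '-' := by
  intro l
  induction l with
  | nil => intro gl no f _; simp [gapLoopA]
  | cons c t ih =>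
    intro gl no f hf
    by_cases hc : c = '-'
    · subst hc
      rcases hf with hf | hf <;> subst hf <;>
        simp [gapLoopA] <;>
        · obtain ⟨h1, h2⟩ := ih (gl + 1) (no + 1) 1 (Or.inr rfl)
          constructor <;> omega
    · obtain ⟨h1, h2⟩ := ih gl no 0 (Or.inl rfl)
      simp [gapLoopA, hc, h1, h2]

-- ===== VERDICT (by name: the statement is the Claim_ definition above) =====
theorem gap_penalties_spec : Claim_equal_gap_penalties := by
  intro sequence gap_open gap_extend _
  unfold Spec_gap_penalties gap_penalties gap_penalties_alt
  obtain ⟨h1, h2⟩ := gapLoopA_invariant sequence.toList 0 0 0 (Or.inl rfl)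
  rw [str_count_dash]
  simp only [h1, h2]
  ring
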